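-- pv_equiv track=rewrite | github.com/albecst/Fundamentos-de-programacion | Cuaderno 5/5.9.py | suma_edades
-- ===== SOURCE A (Python) =====
-- def suma_edades(alumnos, posini, posfin):
--     if len(alumnos["edad"]) == 1:
--         resultado = alumnos["edad"][0]
--     elif posini == posfin:
--         resultado = alumnos["edad"][posini]
--     else:
--         resultado = alumnos["edad"][posini] + suma_edades(alumnos, posini+1, posfin)
--     return resultado
-- ===== SOURCE B (Python) =====
-- def suma_edades(alumnos, posini, posfin):
--     edad = alumnos["edad"]
--     if len(edad) == 1:
--         return edad[0]
--     return sum(edad[i] for i in range(posini, posfin + 1))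
-- ===== Notes on version B (the rewrite author's own statement) =====
-- stated objective: simpler
-- what changed: Replaced the explicit recursion over posini by a single sum over range(posini, posfin+1) of the indexed ages (keeping the len==1 guard first), eliminating recursion and manual accumulation.
import Mathlib
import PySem

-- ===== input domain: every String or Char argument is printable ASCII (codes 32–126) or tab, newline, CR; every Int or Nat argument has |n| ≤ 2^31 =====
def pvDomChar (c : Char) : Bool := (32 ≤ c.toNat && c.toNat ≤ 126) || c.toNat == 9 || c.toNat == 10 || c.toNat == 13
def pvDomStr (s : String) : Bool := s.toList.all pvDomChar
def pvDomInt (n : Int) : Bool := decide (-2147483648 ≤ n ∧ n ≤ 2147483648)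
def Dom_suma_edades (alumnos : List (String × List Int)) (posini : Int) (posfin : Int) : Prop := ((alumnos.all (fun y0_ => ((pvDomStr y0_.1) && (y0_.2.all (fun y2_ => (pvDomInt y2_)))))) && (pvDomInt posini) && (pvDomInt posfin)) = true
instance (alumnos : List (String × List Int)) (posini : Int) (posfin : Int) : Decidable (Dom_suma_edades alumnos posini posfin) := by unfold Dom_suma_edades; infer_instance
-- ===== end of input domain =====

-- B replaces A's index recursion by summing the ages over range(posini, posfin+1) (objective: simpler).

-- ===== PORT A =====
-- A's recursion stops when posini = posfin, or when an index access raises IndexError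
-- (pyGet? = none, modelled as `none` here); the measure below strictly decreases on
-- every recursive call because the accessed index posini is then a valid index (< length).
def sumaRecA (edad : List Int) (posini posfin : Int) : Option Int :=
  if edad.length = 1 then PySem.List.pyGet? edad 0
  else if posini = posfin then PySem.List.pyGet? edad posini
  else match h : PySem.List.pyGet? edad posini with
    | none => none
    | some v => (sumaRecA edad (posini + 1) posfin).map (fun r => v + r)
termination_by (max posfin (edad.length : Int) - posini).toNat
decreasing_by
  have hin : PySem.Raise.InRange edad.length posini := by
    by_contra hc
    rw [(PySem.List.pyGet?_eq_none_iff edad posini).mpr hc] at h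
    exact absurd h (by simp)
  have h2 : posini < (edad.length : Int) := hin.2
  omega

def suma_edades (alumnos : List (String × List Int)) (posini : Int) (posfin : Int) : Int :=
  match alumnos.lookup "edad" with
  | none => 0        -- KeyError in Python: excluded by Pre_
  | some edad => (sumaRecA edad posini posfin).getD 0   -- none = IndexError: excluded by Pre_

-- ===== PORT B =====
-- B: 'sum(edad[i] for i in range(posini, posfin+1))'; edad[i] uses pyGetD with default 0
-- (inside Pre_ every index in the range is valid, so the default is never used).
def suma_edades_alt (alumnos : List (String × List Int)) (posini : Int) (posfin : Int) : Int :=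
  match alumnos.lookup "edad" with
  | none => 0        -- KeyError in Python: excluded by Pre_
  | some edad =>
    if edad.length = 1 then (PySem.List.pyGet? edad 0).getD 0
    else ((PySem.List.pyRange posini (posfin + 1) 1).map
            (fun i => PySem.List.pyGetD edad i 0)).sum

-- ===== PRECONDITION & SPEC =====
-- Pre_ excludes exactly the inputs on which A raises: alumnos without an "edad" key
-- (KeyError), and — unless the list has length 1 — index ranges that run off the list
-- (IndexError): we need posini ≤ posfin with every index in [posini, posfin] valid.
def Pre_suma_edades (alumnos : List (String × List Int)) (posini : Int) (posfin : Int) : Prop :=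
  (match alumnos.lookup "edad" with
   | none => false
   | some edad =>
     (edad.length == 1) ||
       (decide (-(edad.length : Int) ≤ posini) && decide (posini ≤ posfin) &&
        decide (posfin ≤ (edad.length : Int) - 1))) = true
instance (alumnos : List (String × List Int)) (posini : Int) (posfin : Int) : Decidable (Pre_suma_edades alumnos posini posfin) := by unfold Pre_suma_edades; infer_instance

def pvWitness_suma_edades : (List (String × List Int)) × Int × Int := ([("edad", [3, 5, 7])], 0, 2)

def Spec_suma_edades (alumnos : List (String × List Int)) (posini : Int) (posfin : Int) (out : Int) : Prop := out = suma_edades_alt alumnos posini posfin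
instance (alumnos : List (String × List Int)) (posini : Int) (posfin : Int) (out : Int) : Decidable (Spec_suma_edades alumnos posini posfin out) := by unfold Spec_suma_edades; infer_instance

-- ===== CLAIM (what is proved, stated in full; the proofs are below) =====
def Claim_equal_suma_edades : Prop := ∀ (alumnos : List (String × List Int)) (posini : Int) (posfin : Int), Dom_suma_edades alumnos posini posfin → Pre_suma_edades alumnos posini posfin → Spec_suma_edades alumnos posini posfin (suma_edades alumnos posini posfin)

-- ===== LEMMAS AND PROOFS =====

-- A valid index yields a value.
theorem pyGet_some (edad : List Int) (i : Int)
    (hin : PySem.Raise.InRange edad.length i) :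
    ∃ v, PySem.List.pyGet? edad i = some v := by
  cases hvv : PySem.List.pyGet? edad i with
  | none => exact absurd hin ((PySem.List.pyGet?_eq_none_iff edad i).mp hvv)
  | some v => exact ⟨v, rfl⟩

-- A's recursion returns the sum of the indexed ages over [posini, posfin], when the
-- length-1 guard is off and every index in the interval is a valid Python index.
theorem rec_eq_sum (edad : List Int) (posfin : Int) (hlen : edad.length ≠ 1)
    (hfin : posfin ≤ (edad.length : Int) - 1) :
    ∀ (posini : Int), -(edad.length : Int) ≤ posini → posini ≤ posfin →
      sumaRecA edad posini posfin
        = some (((PySem.List.pyRange posini (posfin + 1) 1).map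
                   (fun i => PySem.List.pyGetD edad i 0)).sum) := by
  suffices H : ∀ (n : Nat) (posini : Int), (posfin - posini).toNat = n →
      -(edad.length : Int) ≤ posini → posini ≤ posfin →
      sumaRecA edad posini posfin
        = some (((PySem.List.pyRange posini (posfin + 1) 1).map
                   (fun i => PySem.List.pyGetD edad i 0)).sum) by
    intro posini hlo hhi
    exact H (posfin - posini).toNat posini rfl hlo hhi
  intro n
  induction n with
  | zero =>
    intro posini hn hlo hhi
    have heq : posini = posfin := by omega
    subst heq
    obtain ⟨v, hv⟩ := pyGet_some edad posini ⟨hlo, by omega⟩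
    rw [sumaRecA]
    simp only [if_neg hlen, hv]
    rw [PySem.List.pyRange_one_singleton]
    have hgd : PySem.List.pyGetD edad posini 0 = v := by
      simp [PySem.List.pyGetD, hv]
    simp [hgd]
  | succ k ih =>
    intro posini hn hlo hhi
    have hne : posini ≠ posfin := by omega
    obtain ⟨v, hv⟩ := pyGet_some edad posini ⟨hlo, by omega⟩
    rw [sumaRecA]
    simp only [if_neg hlen, if_neg hne]
    rw [hv, ih (posini + 1) (by omega) (by omega) (by omega)]
    rw [show PySem.List.pyRange posini (posfin + 1) 1
          = posini :: PySem.List.pyRange (posini + 1) (posfin + 1) 1 from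
        PySem.List.pyRange_one_cons (by omega)]
    have hgd : PySem.List.pyGetD edad posini 0 = v := by
      simp [PySem.List.pyGetD, hv]
    simp [hgd]

-- ===== VERDICT (by name: the statement is the Claim_ definition above) =====
theorem suma_edades_spec : Claim_equal_suma_edades := by
  unfold Claim_equal_suma_edades
  intro alumnos posini posfin _ hpre
  unfold Spec_suma_edades suma_edades suma_edades_alt
  unfold Pre_suma_edades at hpre
  cases hlk : alumnos.lookup "edad" with
  | none => simp [hlk] at hpre
  | some edad =>
    have hpre' : edad.length = 1 ∨
        ((-(edad.length : Int) ≤ posini ∧ posini ≤ posfin) ∧ posfin < (edad.length : Int)) := by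
      simpa [hlk] using hpre
    by_cases h1 : edad.length = 1
    · simp [sumaRecA, h1]
    · simp only [if_neg h1]
      obtain h | ⟨⟨hlo, hmid⟩, hhi⟩ := hpre'
      · exact absurd h h1
      · rw [rec_eq_sum edad posfin h1 (by omega) posini hlo hmid]
        rfl
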